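-- pv_equiv track=rewrite | github.com/ramseywise/playground | adk-agent-pocs/agents/simple_router/tools/context_tools.py | _walk_chain
-- ===== SOURCE A (Python) =====
-- def _walk_chain(start_id: str, history_by_id: dict) -> list:
--     """Walk the supersedes chain from start_id, returning fact values oldest-first."""
--     chain: list = []
--     current_id: str | None = start_id
--     while current_id:
--         entry = history_by_id.get(current_id)
--         if not entry:
--             break
--         chain.append(entry.get("fact"))
--         current_id = entry.get("supersedes_fact_id")
--     return list(reversed(chain))
-- ===== SOURCE B (Python) =====
-- def _walk_chain(start_id: str, history_by_id: dict) -> list: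
--     """Walk the supersedes chain from start_id, returning fact values oldest-first."""
--     def go(cur, acc):
--         if not cur:
--             return acc
--         entry = history_by_id.get(cur)
--         if not entry:
--             return acc
--         return go(entry.get("supersedes_fact_id"), [entry.get("fact")] + acc)
--     return go(start_id, [])
-- ===== Notes on version B (the rewrite author's own statement) =====
-- stated objective: alternative
-- what changed: A's while-loop appends facts newest-first into a list and reverses it at the end; B is a tail-recursive traversal that prepends each fact onto an accumulator, producing the oldest-first list directly with no reversal.
import Mathlib
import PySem

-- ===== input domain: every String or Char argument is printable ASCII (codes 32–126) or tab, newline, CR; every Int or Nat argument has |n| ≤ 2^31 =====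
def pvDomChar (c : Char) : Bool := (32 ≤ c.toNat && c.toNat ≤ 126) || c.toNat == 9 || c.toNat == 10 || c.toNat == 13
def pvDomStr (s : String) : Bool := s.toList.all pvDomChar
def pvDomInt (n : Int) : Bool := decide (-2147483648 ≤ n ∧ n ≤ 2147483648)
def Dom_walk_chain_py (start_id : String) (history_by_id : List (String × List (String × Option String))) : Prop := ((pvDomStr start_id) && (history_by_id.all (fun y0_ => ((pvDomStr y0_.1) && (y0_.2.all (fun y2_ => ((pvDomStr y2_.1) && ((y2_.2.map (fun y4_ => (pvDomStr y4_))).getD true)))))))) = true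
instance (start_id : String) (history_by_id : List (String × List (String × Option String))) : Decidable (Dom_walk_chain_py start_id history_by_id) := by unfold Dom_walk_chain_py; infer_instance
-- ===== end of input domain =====

-- B replaces A's append-then-reversed() while-loop by a tail recursion that prepends each fact onto an accumulator, building the oldest-first list directly (objective: alternative decomposition; return values only, no mutation).

-- ===== PORT A =====
-- A's while-loop, with fuel (fuel `history_by_id.length + 1` suffices on every input
-- admitted by Pre_; the fuel only makes the same computation total).
-- `cur = ""` stands for Python's falsy current_id (None or ""); both stop the loop.
def pvWalkA (h : List (String × List (String × Option String))) :
    Nat → String → List (Option String) → List (Option String)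
  | 0, _, _ => []  -- fuel exhausted: the chain is cyclic, Python A never returns here
  | fuel + 1, cur, chain =>
    if cur = "" then chain.reverse
    else
      match (PySem.Dict.mk h).get? cur with
      | none => chain.reverse
      | some e =>
        if e = [] then chain.reverse
        else
          pvWalkA h fuel ((((PySem.Dict.mk e).get? "supersedes_fact_id").join).getD "")
            (chain ++ [((PySem.Dict.mk e).get? "fact").join])

def walk_chain_py (start_id : String) (history_by_id : List (String × List (String × Option String))) : List (Option String) :=
  pvWalkA history_by_id (history_by_id.length + 1) start_id []

-- ===== PORT B =====
-- Source B's `if not cur … entry = history_by_id.get(cur) … if not entry` gate, as one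
-- Option pipeline: the live entry of `cur`, or `none` if cur is falsy (None/"") or
-- the entry is missing or falsy ({}).
def pvEntry? (h : List (String × List (String × Option String))) (cur : Option String) :
    Option (List (String × Option String)) :=
  (cur.filter (· ≠ "")).bind fun s => ((PySem.Dict.mk h).get? s).filter (· ≠ [])

-- Source B's inner `go`: tail recursion prepending this entry's fact onto the accumulator.
def pvGo (h : List (String × List (String × Option String))) :
    Nat → Option String → List (Option String) → List (Option String)
  | 0, _, acc => acc
  | fuel + 1, cur, acc =>
    match pvEntry? h cur with
    | none => acc
    | some e =>
      pvGo h fuel (((PySem.Dict.mk e).get? "supersedes_fact_id").join)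
        (((PySem.Dict.mk e).get? "fact").join :: acc)

def walk_chain_py_alt (start_id : String) (history_by_id : List (String × List (String × Option String))) : List (Option String) :=
  pvGo history_by_id (history_by_id.length + 1) (some start_id) []

-- ===== PRECONDITION & SPEC =====
-- Pre_ excludes exactly the inputs on which Python A never returns: a supersedes
-- cycle reachable from start_id makes A's while-loop run forever (B's recursion
-- likewise never returns there).  Pre_ states that start_id reaches a sink of the
-- input's supersedes-pointer map within history_by_id.length + 1 hops — a condition
-- on the pointer graph only (on every input where A returns, the chain is acyclic,
-- so it reaches a sink within that many hops and Pre_ holds).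
def pvStep (h : List (String × List (String × Option String))) : Option String → Option String
  | none => none
  | some cur =>
    if cur = "" then none
    else
      match (PySem.Dict.mk h).get? cur with
      | none => none
      | some e =>
        if e = [] then none
        else some ((((PySem.Dict.mk e).get? "supersedes_fact_id").join).getD "")

def Pre_walk_chain_py (start_id : String) (history_by_id : List (String × List (String × Option String))) : Prop :=
  (pvStep history_by_id)^[history_by_id.length + 1] (some start_id) = none
instance (start_id : String) (history_by_id : List (String × List (String × Option String))) : Decidable (Pre_walk_chain_py start_id history_by_id) := by unfold Pre_walk_chain_py; infer_instance

def pvWitness_walk_chain_py : String × (List (String × List (String × Option String))) :=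
  ("a", [("a", [("fact", some "x"), ("supersedes_fact_id", some "b")]), ("b", [("fact", some "y")])])

def Spec_walk_chain_py (start_id : String) (history_by_id : List (String × List (String × Option String))) (out : List (Option String)) : Prop := out = walk_chain_py_alt start_id history_by_id
instance (start_id : String) (history_by_id : List (String × List (String × Option String))) (out : List (Option String)) : Decidable (Spec_walk_chain_py start_id history_by_id out) := by unfold Spec_walk_chain_py; infer_instance

-- ===== CLAIM (what is proved, stated in full; the proofs are below) =====
def Claim_equal_walk_chain_py : Prop := ∀ (start_id : String) (history_by_id : List (String × List (String × Option String))), Dom_walk_chain_py start_id history_by_id → Pre_walk_chain_py start_id history_by_id → Spec_walk_chain_py start_id history_by_id (walk_chain_py start_id history_by_id)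

-- ===== LEMMAS AND PROOFS =====

-- B's gate treats a `none` pointer and a `some ""` pointer identically (both falsy),
-- so `pvGo` does too.
theorem pvGo_getD (h : List (String × List (String × Option String))) (fuel : Nat)
    (o : Option String) (acc : List (Option String)) :
    pvGo h fuel (some (o.getD "")) acc = pvGo h fuel o acc := by
  cases o with
  | none => cases fuel <;> simp [pvGo, pvEntry?, Option.filter]
  | some s => rfl

-- Loop invariant: whenever the pointer map reaches its sink within the given fuel,
-- A's append-and-reverse loop equals B's prepend recursion started from the
-- reversed accumulator.
theorem pvWalkA_eq (h : List (String × List (String × Option String))) :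
    ∀ (fuel : Nat) (cur : String) (chain : List (Option String)),
      (pvStep h)^[fuel] (some cur) = none →
      pvWalkA h fuel cur chain = pvGo h fuel (some cur) chain.reverse := by
  intro fuel
  induction fuel with
  | zero => intro cur chain hh; simp at hh
  | succ n ih =>
    intro cur chain hh
    rw [Function.iterate_succ_apply] at hh
    by_cases hc : cur = ""
    · subst hc
      have hE : pvEntry? h (some "") = none := by simp [pvEntry?]
      simp [pvWalkA, pvGo, hE]
    · simp only [pvStep, if_neg hc] at hh
      cases hget : (PySem.Dict.mk h).get? cur with
      | none =>
        have hE : pvEntry? h (some cur) = none := by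
          simp [pvEntry?, Option.filter, hget, hc]
        simp [pvWalkA, pvGo, hE, hc, hget]
      | some e =>
        simp only [hget] at hh
        by_cases he : e = []
        · have hE : pvEntry? h (some cur) = none := by
            simp [pvEntry?, Option.filter, hget, hc, he]
          simp [pvWalkA, pvGo, hE, hc, hget, he]
        · have hE : pvEntry? h (some cur) = some e := by
            simp [pvEntry?, Option.filter, hget, hc, he]
          simp only [if_neg he] at hh
          simp only [pvWalkA, pvGo, if_neg hc, hget, if_neg he, hE]
          rw [ih _ _ hh, pvGo_getD]
          simp

-- ===== VERDICT (by name: the statement is the Claim_ definition above) =====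
theorem walk_chain_py_spec : Claim_equal_walk_chain_py := by
  intro start_id h _ hpre
  unfold Spec_walk_chain_py walk_chain_py walk_chain_py_alt
  rw [pvWalkA_eq h _ _ _ hpre]
  rfl
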